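-- pv_equiv track=rewrite | github.com/NXTLupo/internal-solutions-radiant-compass | backend/app/security.py | sanitize_phi_log
-- ===== SOURCE A (Python) =====
-- from typing import Optional, Dict, Any
--
-- def sanitize_phi_log(data: Dict[str, Any]) -> Dict[str, Any]:
--     """Remove or mask PHI from log data"""
--     phi_fields = [
--         "email", "phone", "address", "ssn", "medical_record_number",
--         "date_of_birth", "full_name", "first_name", "last_name"
--     ]
--
--     sanitized = data.copy()
--     for field in phi_fields:
--         if field in sanitized:
--             if isinstance(sanitized[field], str) and len(sanitized[field]) > 0:
--                 sanitized[field] = "***MASKED***"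
--             else:
--                 sanitized[field] = "***MASKED***"
--
--     return sanitized
-- ===== SOURCE B (Python) =====
-- PHI_FIELDS = {
--     "email", "phone", "address", "ssn", "medical_record_number",
--     "date_of_birth", "full_name", "first_name", "last_name"
-- }
--
-- def sanitize_phi_log(data):
--     return {k: ("***MASKED***" if k in PHI_FIELDS else v) for k, v in data.items()}
-- ===== Notes on version B (the rewrite author's own statement) =====
-- stated objective: simpler
-- what changed: Replaces copy-then-mutate over the fixed nine-field list with a single dict comprehension over data.items() that emits the mask when the key is in a PHI set and the original value otherwise.
import Mathlib
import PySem

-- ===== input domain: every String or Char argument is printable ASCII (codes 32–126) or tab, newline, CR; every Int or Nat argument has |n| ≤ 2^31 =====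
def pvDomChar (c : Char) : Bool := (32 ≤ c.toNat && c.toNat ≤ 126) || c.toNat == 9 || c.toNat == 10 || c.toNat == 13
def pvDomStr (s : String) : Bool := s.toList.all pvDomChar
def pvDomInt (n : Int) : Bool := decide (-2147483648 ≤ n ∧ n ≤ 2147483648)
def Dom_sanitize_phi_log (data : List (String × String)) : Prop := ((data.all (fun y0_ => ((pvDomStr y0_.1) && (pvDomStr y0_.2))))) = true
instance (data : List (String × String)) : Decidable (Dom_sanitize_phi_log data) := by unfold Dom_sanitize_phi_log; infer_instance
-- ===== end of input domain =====

-- B masks by one pass over the incoming dict's items (set membership) instead of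
-- copy-then-mutate over the fixed field list; objective: simpler.

-- ===== PORT A =====
def sanitize_phi_log (data : List (String × String)) : List (String × String) :=
  let phi_fields : List String :=
    ["email", "phone", "address", "ssn", "medical_record_number",
     "date_of_birth", "full_name", "first_name", "last_name"]
  let sanitized := PySem.Dict.ofList data
  let sanitized := phi_fields.foldl
    (fun d field =>
      if d.contains field then
        -- values are String here, so 'isinstance(…, str)' is True; both branches assign the same mask
        (if PySem.Str.len (d.getD field "") > 0 then d.insert field "***MASKED***"
         else d.insert field "***MASKED***")
      else d) sanitized
  sanitized.items

-- ===== PORT B =====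
def phiFieldsSet : PySem.Set String :=
  PySem.Set.ofList
    ["email", "phone", "address", "ssn", "medical_record_number",
     "date_of_birth", "full_name", "first_name", "last_name"]

def sanitize_phi_log_alt (data : List (String × String)) : List (String × String) :=
  (PySem.Dict.ofList data).items.map
    (fun kv => if kv.1 ∈ phiFieldsSet then (kv.1, "***MASKED***") else kv)

-- ===== PRECONDITION & SPEC =====
def Spec_sanitize_phi_log (data : List (String × String)) (out : List (String × String)) : Prop := out = sanitize_phi_log_alt data
instance (data : List (String × String)) (out : List (String × String)) : Decidable (Spec_sanitize_phi_log data out) := by unfold Spec_sanitize_phi_log; infer_instance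

-- ===== CLAIM (what is proved, stated in full; the proofs are below) =====
def Claim_equal_sanitize_phi_log : Prop := ∀ (data : List (String × String)), Dom_sanitize_phi_log data → Spec_sanitize_phi_log data (sanitize_phi_log data)

-- ===== LEMMAS AND PROOFS =====

-- The masking loop over a field list rewrites exactly the items whose key is in that list.
theorem mask_foldl_items (fields : List String) (d : PySem.Dict String String)
    (hnd : d.keys.Nodup) :
    (fields.foldl
      (fun d field =>
        if d.contains field then
          (if PySem.Str.len (d.getD field "") > 0 then d.insert field "***MASKED***"
           else d.insert field "***MASKED***")
        else d) d).items
      = d.items.map (fun kv => if kv.1 ∈ fields then (kv.1, "***MASKED***") else kv) := by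
  induction fields generalizing d with
  | nil => simp
  | cons f fs ih =>
    simp only [List.foldl_cons]
    by_cases hc : d.contains f = true
    · rw [if_pos hc, ite_self, ih _ (PySem.Dict.nodup_keys_insert d f _ hnd),
        PySem.Dict.items_insert_of_contains d "***MASKED***" hc, List.map_map]
      apply List.map_congr_left
      intro kv _
      simp only [Function.comp]
      by_cases hk : kv.1 = f
      · simp [hk]
      · simp only [beq_iff_eq, hk, if_false, List.mem_cons]
        by_cases hm : kv.1 ∈ fs <;> simp [hm]
    · rw [if_neg hc, ih _ hnd]
      apply List.map_congr_left
      intro kv hkv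
      have hk : kv.1 ≠ f := by
        intro h
        exact hc (PySem.Dict.contains_iff_mem_keys d f |>.mpr
          (h ▸ PySem.Dict.mem_keys_of_mem_items d hkv))
      simp only [List.mem_cons]
      by_cases hm : kv.1 ∈ fs <;> simp [hm, hk]

-- ===== VERDICT (by name: the statement is the Claim_ definition above) =====
theorem sanitize_phi_log_spec : Claim_equal_sanitize_phi_log := by
  intro data _
  unfold Spec_sanitize_phi_log sanitize_phi_log sanitize_phi_log_alt
  rw [mask_foldl_items _ _ (PySem.Dict.nodup_keys_ofList data)]
  apply List.map_congr_left
  intro kv _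
  have : (kv.1 ∈ phiFieldsSet) ↔
      kv.1 ∈ ["email", "phone", "address", "ssn", "medical_record_number",
              "date_of_birth", "full_name", "first_name", "last_name"] := by
    unfold phiFieldsSet
    exact PySem.Set.mem_ofList _ _
  by_cases hm : kv.1 ∈ phiFieldsSet
  · rw [if_pos hm, if_pos (this.mp hm)]
  · rw [if_neg hm, if_neg (fun h => hm (this.mpr h))]
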